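-- pv_equiv track=rewrite | github.com/jeevesh415/OpenThoughts-Agent | data/unique_scale/r2egym/generate_r2egym_2_1x.py | upsample_to_target
-- ===== SOURCE A (Python) =====
-- def upsample_to_target(
--     instructions: list,
--     metadata: list,
--     dockerfiles: list,
--     task_tomls: list,
--     target_count: int,
-- ) -> tuple[list, list, list, list]:
--     """Upsample data by duplicating entries to reach target count."""
--     upsampled_instructions = []
--     upsampled_metadata = []
--     upsampled_dockerfiles = []
--     upsampled_task_tomls = []
--
--     idx = 0
--     while len(upsampled_instructions) < target_count:
--         upsampled_instructions.append(instructions[idx % len(instructions)])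
--         upsampled_metadata.append(metadata[idx % len(metadata)])
--         upsampled_dockerfiles.append(dockerfiles[idx % len(dockerfiles)])
--         upsampled_task_tomls.append(task_tomls[idx % len(task_tomls)])
--         idx += 1
--
--     return upsampled_instructions, upsampled_metadata, upsampled_dockerfiles, upsampled_task_tomls
-- ===== SOURCE B (Python) =====
-- def upsample_to_target(
--     instructions: list,
--     metadata: list,
--     dockerfiles: list,
--     task_tomls: list,
--     target_count: int,
-- ) -> tuple[list, list, list, list]:
--     """Upsample data by duplicating entries to reach target count."""
--     if target_count <= 0:
--         return [], [], [], []
--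
--     def cycle_to(lst):
--         reps = target_count // len(lst) + 1
--         return (lst * reps)[:target_count]
--
--     return (
--         cycle_to(instructions),
--         cycle_to(metadata),
--         cycle_to(dockerfiles),
--         cycle_to(task_tomls),
--     )
-- ===== Notes on version B (the rewrite author's own statement) =====
-- stated objective: idiomatic
-- what changed: Replaces the interleaved modulo-indexed append loop with four independent block-replication-and-slice builds ((lst * reps)[:target_count]), with target_count <= 0 handled up front.
import Mathlib
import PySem

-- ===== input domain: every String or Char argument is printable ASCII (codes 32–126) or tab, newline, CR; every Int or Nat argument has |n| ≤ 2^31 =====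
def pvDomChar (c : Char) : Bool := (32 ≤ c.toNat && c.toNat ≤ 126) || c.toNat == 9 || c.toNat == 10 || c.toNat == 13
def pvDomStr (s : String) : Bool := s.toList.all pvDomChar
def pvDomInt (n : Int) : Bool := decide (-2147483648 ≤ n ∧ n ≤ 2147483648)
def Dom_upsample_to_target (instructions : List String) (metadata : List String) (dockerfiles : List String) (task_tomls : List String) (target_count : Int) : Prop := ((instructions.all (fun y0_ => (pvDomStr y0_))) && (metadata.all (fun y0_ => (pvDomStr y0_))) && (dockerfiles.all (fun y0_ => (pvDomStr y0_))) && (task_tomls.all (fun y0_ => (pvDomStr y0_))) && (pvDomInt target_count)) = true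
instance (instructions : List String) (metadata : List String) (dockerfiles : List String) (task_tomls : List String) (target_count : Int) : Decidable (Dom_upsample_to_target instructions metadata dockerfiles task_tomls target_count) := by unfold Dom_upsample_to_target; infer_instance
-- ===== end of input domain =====

-- B replaces A's interleaved modulo-indexed append loop by four independent
-- block-replication-and-slice builds (idiomatic); return values proved equal on Pre_.

-- ===== PORT A =====
-- the while loop of A: state = (idx, four accumulators); terminates because the
-- first accumulator grows by one each iteration
def upsampleLoop (instructions metadata dockerfiles task_tomls : List String)
    (target : Int) (idx : Nat) (a1 a2 a3 a4 : List String) :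
    List String × List String × List String × List String :=
  if (a1.length : Int) < target then
    upsampleLoop instructions metadata dockerfiles task_tomls target (idx + 1)
      (a1 ++ [instructions.getD (idx % instructions.length) ""])
      (a2 ++ [metadata.getD (idx % metadata.length) ""])
      (a3 ++ [dockerfiles.getD (idx % dockerfiles.length) ""])
      (a4 ++ [task_tomls.getD (idx % task_tomls.length) ""])
  else
    (a1, a2, a3, a4)
termination_by (target - a1.length).toNat
decreasing_by simp only [List.length_append, List.length_cons, List.length_nil]; omega

def upsample_to_target (instructions : List String) (metadata : List String) (dockerfiles : List String) (task_tomls : List String) (target_count : Int) : List String × List String × List String × List String :=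
  upsampleLoop instructions metadata dockerfiles task_tomls target_count 0 [] [] [] []

-- ===== PORT B =====
-- cycle_to: (lst * reps)[:target_count]  with reps = target_count // len(lst) + 1
-- (the slice [:tc] with tc ≥ 0 is List.take tc.toNat)
def cycleTo (lst : List String) (target : Int) : List String :=
  (List.flatten (List.replicate (PySem.Int.floordiv target (lst.length : Int) + 1).toNat lst)).take target.toNat

def upsample_to_target_alt (instructions : List String) (metadata : List String) (dockerfiles : List String) (task_tomls : List String) (target_count : Int) : List String × List String × List String × List String :=
  if target_count ≤ 0 then ([], [], [], [])
  else (cycleTo instructions target_count, cycleTo metadata target_count,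
        cycleTo dockerfiles target_count, cycleTo task_tomls target_count)

-- ===== PRECONDITION & SPEC =====
-- Pre_ excludes exactly the inputs where A raises ZeroDivisionError (idx % 0):
-- a positive target with some empty input list; B raises there too.
def Pre_upsample_to_target (instructions : List String) (metadata : List String) (dockerfiles : List String) (task_tomls : List String) (target_count : Int) : Prop :=
  target_count ≤ 0 ∨ (instructions ≠ [] ∧ metadata ≠ [] ∧ dockerfiles ≠ [] ∧ task_tomls ≠ [])
instance (instructions : List String) (metadata : List String) (dockerfiles : List String) (task_tomls : List String) (target_count : Int) : Decidable (Pre_upsample_to_target instructions metadata dockerfiles task_tomls target_count) := by unfold Pre_upsample_to_target; infer_instance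

def pvWitness_upsample_to_target : List String × List String × List String × List String × Int :=
  (["a", "b"], ["m"], ["d", "e", "f"], ["t"], 5)

def Spec_upsample_to_target (instructions : List String) (metadata : List String) (dockerfiles : List String) (task_tomls : List String) (target_count : Int) (out : List String × List String × List String × List String) : Prop := out = upsample_to_target_alt instructions metadata dockerfiles task_tomls target_count
instance (instructions : List String) (metadata : List String) (dockerfiles : List String) (task_tomls : List String) (target_count : Int) (out : List String × List String × List String × List String) : Decidable (Spec_upsample_to_target instructions metadata dockerfiles task_tomls target_count out) := by unfold Spec_upsample_to_target; infer_instance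

-- ===== CLAIM (what is proved, stated in full; the proofs are below) =====
def Claim_equal_upsample_to_target : Prop := ∀ (instructions : List String) (metadata : List String) (dockerfiles : List String) (task_tomls : List String) (target_count : Int), Dom_upsample_to_target instructions metadata dockerfiles task_tomls target_count → Pre_upsample_to_target instructions metadata dockerfiles task_tomls target_count → Spec_upsample_to_target instructions metadata dockerfiles task_tomls target_count (upsample_to_target instructions metadata dockerfiles task_tomls target_count)

-- ===== LEMMAS AND PROOFS =====

-- canonical cyclic prefix: the first n elements of lst repeated
def cyc (lst : List String) (n : Nat) : List String :=
  (List.range n).map (fun j => lst.getD (j % lst.length) "")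

theorem cyc_len (lst : List String) : cyc lst lst.length = lst := by
  apply List.ext_getElem
  · simp [cyc]
  · intro i hi1 hi2
    simp only [cyc, List.getElem_map, List.getElem_range]
    rw [Nat.mod_eq_of_lt (by simpa [cyc] using hi2 : i < lst.length)]
    exact List.getD_eq_getElem _ _ _

theorem cyc_take (lst : List String) (n : Nat) (h : n ≤ lst.length) :
    cyc lst n = lst.take n := by
  conv_rhs => rw [← cyc_len lst]
  simp only [cyc, ← List.map_take, List.take_range, Nat.min_eq_left h]

theorem cyc_add (lst : List String) (r : Nat) :
    cyc lst (lst.length + r) = lst ++ cyc lst r := by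
  simp only [cyc, List.range_add, List.map_append, List.map_map]
  congr 1
  · exact cyc_len lst
  · apply List.map_congr_left
    intro j _
    simp [Nat.add_mod_left]

-- B's flatten-replicate-take equals the cyclic prefix
theorem take_flatten_replicate (lst : List String) (m n : Nat)
    (h : n ≤ m * lst.length) :
    (List.flatten (List.replicate m lst)).take n = cyc lst n := by
  induction m generalizing n with
  | zero =>
    have : n = 0 := by omega
    simp [this, cyc]
  | succ m ih =>
    rw [List.replicate_succ, List.flatten_cons, List.take_append]
    by_cases hn : n ≤ lst.length
    · rw [Nat.sub_eq_zero_of_le hn]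
      simp [cyc_take lst n hn]
    · replace hn : lst.length < n := Nat.lt_of_not_le hn
      have hrec : n - lst.length ≤ m * lst.length := by
        rw [Nat.succ_mul] at h; omega
      rw [List.take_of_length_le (by omega), ih (n - lst.length) hrec]
      have heq : n = lst.length + (n - lst.length) := by omega
      conv_rhs => rw [heq, cyc_add]

-- A's loop, started at step k with accumulators = the k-step cyclic prefixes,
-- finishes with the target.toNat-step cyclic prefixes
theorem loop_inv (ins md df tt : List String) (target : Int)
    (k : Nat) (hk : k ≤ target.toNat) :
    upsampleLoop ins md df tt target k (cyc ins k) (cyc md k) (cyc df k) (cyc tt k) =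
      (cyc ins target.toNat, cyc md target.toNat, cyc df target.toNat, cyc tt target.toNat) := by
  rw [upsampleLoop]
  have e1 : (cyc ins k).length = k := by simp [cyc]
  simp only [e1]
  by_cases hlt : (k : Int) < target
  · rw [if_pos hlt]
    have step : ∀ lst : List String,
        cyc lst k ++ [lst.getD (k % lst.length) ""] = cyc lst (k + 1) := by
      intro lst; simp [cyc, List.range_succ]
    rw [step ins, step md, step df, step tt]
    exact loop_inv ins md df tt target (k + 1) (by omega)
  · rw [if_neg hlt]
    have : k = target.toNat := by omega
    subst this; rfl
termination_by target.toNat - k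

theorem cycleTo_eq (lst : List String) (target : Int) (hne : lst ≠ []) (hpos : 0 < target) :
    cycleTo lst target = cyc lst target.toNat := by
  have hlen : 0 < lst.length := List.length_pos_of_ne_nil hne
  unfold cycleTo
  rw [show target = ((target.toNat : Nat) : Int) from (Int.toNat_of_nonneg (le_of_lt hpos)).symm]
  rw [PySem.Int.floordiv_natCast]
  have hrep : ∀ a : Nat, (((a : Nat) : Int) + 1).toNat = a + 1 := by intro a; omega
  rw [hrep, Int.toNat_natCast]
  exact take_flatten_replicate lst _ _
    (le_of_lt ((Nat.div_lt_iff_lt_mul hlen).mp (Nat.lt_succ_self _)))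

-- ===== VERDICT (by name: the statement is the Claim_ definition above) =====
theorem upsample_to_target_spec : Claim_equal_upsample_to_target := by
  intro ins md df tt tc _ hpre
  unfold Spec_upsample_to_target upsample_to_target upsample_to_target_alt
  by_cases htc : tc ≤ 0
  · rw [upsampleLoop]
    simp only [List.length_nil, Nat.cast_zero]
    rw [if_neg (show ¬((0:Int) < tc) by omega), if_pos htc]
  · obtain ⟨h1, h2, h3, h4⟩ := hpre.resolve_left htc
    rw [if_neg htc, cycleTo_eq ins tc h1 (by omega), cycleTo_eq md tc h2 (by omega),
        cycleTo_eq df tc h3 (by omega), cycleTo_eq tt tc h4 (by omega)]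
    have := loop_inv ins md df tt tc 0 (Nat.zero_le _)
    simpa [cyc] using this
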